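-- pv_equiv track=rewrite | github.com/jk-jung/problem-solving | codewars/7kyu/7_Triangular range.py | triangular_range
-- ===== SOURCE A (Python) =====
-- def triangular_range(start, stop):
--     s, i = 0, 0
--     r = {}
--     while s + i <= stop:
--         s += i
--         if s >= start:
--             r[i] = s
--         i += 1
--     return r
-- ===== SOURCE B (Python) =====
-- from math import isqrt
--
--
-- def _tmax(x):
--     # largest i >= 0 with i*(i+1)//2 <= x, for x >= 0 (exact by integer isqrt)
--     return (isqrt(8 * x + 1) - 1) // 2
--
--
-- def triangular_range(start, stop):
--     if stop < 0:
--         return {}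
--     hi = _tmax(stop)
--     lo = 0 if start <= 0 else _tmax(start - 1) + 1
--     return {i: i * (i + 1) // 2 for i in range(lo, hi + 1)}
-- ===== Notes on version B (the rewrite author's own statement) =====
-- stated objective: alternative
-- what changed: Replaced the running-sum while loop (which walks every index from 0 upward) by closed-form index bounds computed with math.isqrt (lo = smallest i with T(i) >= start, hi = largest i with T(i) <= stop) and a dict comprehension over range(lo, hi+1).
import Mathlib
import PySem

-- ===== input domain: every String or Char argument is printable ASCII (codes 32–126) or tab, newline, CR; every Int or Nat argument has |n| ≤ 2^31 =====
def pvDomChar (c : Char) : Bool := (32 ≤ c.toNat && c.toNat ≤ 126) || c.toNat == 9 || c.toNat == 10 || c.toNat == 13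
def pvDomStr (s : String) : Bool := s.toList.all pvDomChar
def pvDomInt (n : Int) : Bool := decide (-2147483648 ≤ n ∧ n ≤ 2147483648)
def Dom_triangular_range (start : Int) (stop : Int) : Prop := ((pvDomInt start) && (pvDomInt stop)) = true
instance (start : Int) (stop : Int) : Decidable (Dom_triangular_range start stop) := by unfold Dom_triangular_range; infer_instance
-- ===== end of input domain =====

-- B replaces A's running-sum while loop by closed-form isqrt index bounds plus a range comprehension.

-- ===== PORT A =====
-- the while loop: state (s, i, r); the proof argument 0 ≤ i records that Python's
-- loop counter starts at 0 and only increments (needed for termination only)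
def triangular_range_loop (start stop s i : Int) (r : PySem.Dict Int Int) (h0 : 0 ≤ i) : PySem.Dict Int Int :=
  if h : s + i ≤ stop then
    triangular_range_loop start stop (s + i) (i + 1)
      (if start ≤ s + i then r.insert i (s + i) else r) (by omega)
  else r
termination_by (stop + 1 - (s + i)).toNat
decreasing_by omega

def triangular_range (start : Int) (stop : Int) : List (Int × Int) :=
  (triangular_range_loop start stop 0 0 PySem.Dict.empty (by omega)).items

-- ===== PORT B =====
-- math.isqrt n, exact for 0 ≤ n (B only calls it on nonnegative arguments)
def pyIsqrt (n : Int) : Int := Int.ofNat (Nat.sqrt n.toNat)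

-- _tmax: largest i ≥ 0 with i*(i+1)//2 ≤ x, for x ≥ 0
def tmaxB (x : Int) : Int := PySem.Int.floordiv (pyIsqrt (8 * x + 1) - 1) 2

-- i*(i+1)//2, the value expression of B's dict comprehension
def triVal (i : Int) : Int := PySem.Int.floordiv (i * (i + 1)) 2

def triangular_range_alt (start : Int) (stop : Int) : List (Int × Int) :=
  if stop < 0 then []
  else
    let hi := tmaxB stop
    let lo := if start ≤ 0 then 0 else tmaxB (start - 1) + 1
    ((PySem.List.pyRange lo (hi + 1) 1).foldl
      (fun d i => d.insert i (triVal i)) PySem.Dict.empty).items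

-- ===== PRECONDITION & SPEC =====
def Spec_triangular_range (start : Int) (stop : Int) (out : List (Int × Int)) : Prop := out = triangular_range_alt start stop
instance (start : Int) (stop : Int) (out : List (Int × Int)) : Decidable (Spec_triangular_range start stop out) := by unfold Spec_triangular_range; infer_instance

-- ===== CLAIM (what is proved, stated in full; the proofs are below) =====
def Claim_equal_triangular_range : Prop := ∀ (start : Int) (stop : Int), Dom_triangular_range start stop → Spec_triangular_range start stop (triangular_range start stop)

-- ===== LEMMAS AND PROOFS =====

def loB (start : Int) : Int := if start ≤ 0 then 0 else tmaxB (start - 1) + 1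

lemma tri_two (i : Int) : 2 * triVal i = i * (i + 1) := by
  obtain ⟨t, ht⟩ := Int.even_mul_succ_self i
  unfold triVal
  rw [ht, PySem.Int.floordiv_eq_ediv_of_pos (by omega)]
  omega

lemma tri_mono {i j : Int} (h0 : 0 ≤ i) (hij : i ≤ j) : triVal i ≤ triVal j := by
  nlinarith [tri_two i, tri_two j]

lemma tmax_spec {x : Int} (hx : 0 ≤ x) :
    0 ≤ tmaxB x ∧ triVal (tmaxB x) ≤ x ∧ x < triVal (tmaxB x + 1) := by
  set m := x.toNat with hm
  have hxm : x = (m : Int) := by omega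
  have hn : (8 * x + 1).toNat = 8 * m + 1 := by omega
  set q := Nat.sqrt (8 * m + 1) with hq
  have h1 : q * q ≤ 8 * m + 1 := by simpa [pow_two] using Nat.sqrt_le' (8 * m + 1)
  have h2 : 8 * m + 1 < (q + 1) * (q + 1) := by simpa [pow_two] using Nat.lt_succ_sqrt' (8 * m + 1)
  have hq1 : 1 ≤ q := by
    rcases Nat.eq_zero_or_pos q with h | h
    · rw [h] at h2; omega
    · exact h
  have hiq : pyIsqrt (8 * x + 1) = (q : Int) := by
    unfold pyIsqrt; rw [hn]; rfl
  have htm : tmaxB x = (((q - 1) / 2 : Nat) : Int) := by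
    unfold tmaxB
    rw [hiq]
    have : (q : Int) - 1 = ((q - 1 : Nat) : Int) := by omega
    rw [this]
    exact_mod_cast PySem.Int.floordiv_natCast (q - 1) 2
  set h := (q - 1) / 2 with hh
  have hb : 2 * h + 1 ≤ q ∧ q ≤ 2 * h + 2 := by omega
  have hle : h * (h + 1) ≤ 2 * m := by nlinarith
  have hgt : 2 * m < (h + 1) * (h + 2) := by nlinarith
  rw [htm]
  refine ⟨by positivity, ?_, ?_⟩
  · have := tri_two (h : Int)
    have hc : ((h : Int)) * ((h : Int) + 1) ≤ 2 * x := by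
      rw [hxm]; exact_mod_cast hle
    omega
  · have := tri_two ((h : Int) + 1)
    have hc : 2 * x < ((h : Int) + 1) * ((h : Int) + 2) := by
      rw [hxm]; exact_mod_cast hgt
    have hr : ((h : Int) + 1) * ((h : Int) + 1 + 1) = ((h : Int) + 1) * ((h : Int) + 2) := by ring
    omega

lemma lo_nonneg (start : Int) : 0 ≤ loB start := by
  unfold loB
  split_ifs with h
  · omega
  · have := tmax_spec (x := start - 1) (by omega)
    omega

lemma lo_iff (start : Int) {i : Int} (h0 : 0 ≤ i) :
    start ≤ triVal i ↔ loB start ≤ i := by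
  unfold loB
  split_ifs with h
  · constructor
    · intro _; omega
    · intro _
      have := tri_two i
      nlinarith
  · obtain ⟨ht0, ht1, ht2⟩ := tmax_spec (x := start - 1) (by omega)
    constructor
    · intro hs
      by_contra hc
      have : i ≤ tmaxB (start - 1) := by omega
      have := tri_mono h0 this
      omega
    · intro hl
      have := tri_mono (i := tmaxB (start - 1) + 1) (by omega) hl
      omega

lemma loop_eq (start stop : Int) (hstop : 0 ≤ stop) :
    ∀ (n : Nat) (i s : Int) (h0 : 0 ≤ i), 2 * s = i * (i - 1) →
      (tmaxB stop + 1 - i).toNat ≤ n → ∀ (r : PySem.Dict Int Int),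
      triangular_range_loop start stop s i r h0 =
        (PySem.List.pyRange (max i (loB start)) (tmaxB stop + 1) 1).foldl
          (fun d j => d.insert j (triVal j)) r := by
  obtain ⟨htn, hts, htg⟩ := tmax_spec hstop
  intro n
  induction n with
  | zero =>
    intro i s h0 hs hn r
    have hsi : s + i = triVal i := by
      linarith [tri_two i, (by ring : i * (i + 1) = i * (i - 1) + 2 * i)]
    have hiH : tmaxB stop + 1 ≤ i := by omega
    have hguard : ¬ (s + i ≤ stop) := by
      have h1 : triVal (tmaxB stop + 1) ≤ triVal i := tri_mono (by omega) hiH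
      omega
    rw [triangular_range_loop, dif_neg hguard]
    have hempty : PySem.List.pyRange (max i (loB start)) (tmaxB stop + 1) 1 = [] := by
      rw [PySem.List.pyRange_one]
      have : (tmaxB stop + 1 - max i (loB start)).toNat = 0 := by omega
      rw [this]
      simp
    rw [hempty]
    rfl
  | succ n ih =>
    intro i s h0 hs hn r
    have hsi : s + i = triVal i := by
      linarith [tri_two i, (by ring : i * (i + 1) = i * (i - 1) + 2 * i)]
    by_cases hguard : s + i ≤ stop
    · -- the loop body runs; s + i = triVal i ≤ stop, hence i ≤ tmaxB stop
      have hiH : i ≤ tmaxB stop := by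
        by_contra hc
        have : triVal (tmaxB stop + 1) ≤ triVal i := tri_mono (by omega) (by omega)
        omega
      rw [triangular_range_loop, dif_pos hguard]
      rw [ih (i + 1) (s + i) (by omega)
        (by linarith [hs, (by ring : (i + 1) * ((i + 1) - 1) = i * (i - 1) + 2 * i)])
        (by omega)]
      by_cases hmem : start ≤ s + i
      · have hlo : loB start ≤ i := by rw [← lo_iff start h0, ← hsi]; exact hmem
        have hmax1 : max i (loB start) = i := by omega
        have hmax2 : max (i + 1) (loB start) = i + 1 := by omega
        rw [hmax1, hmax2,
          show PySem.List.pyRange i (tmaxB stop + 1) 1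
              = i :: PySem.List.pyRange (i + 1) (tmaxB stop + 1) 1
            from PySem.List.pyRange_one_cons (by omega)]
        simp only [List.foldl_cons]
        rw [if_pos hmem, hsi]
      · have hlo : ¬ (loB start ≤ i) := by rw [← lo_iff start h0, ← hsi]; exact hmem
        have hmax1 : max i (loB start) = loB start := by omega
        have hmax2 : max (i + 1) (loB start) = loB start := by omega
        rw [hmax1, hmax2, if_neg hmem]
    · have hiH : tmaxB stop + 1 ≤ i := by
        by_contra hc
        have : triVal i ≤ triVal (tmaxB stop) := tri_mono h0 (by omega)
        omega
      rw [triangular_range_loop, dif_neg hguard]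
      have hempty : PySem.List.pyRange (max i (loB start)) (tmaxB stop + 1) 1 = [] := by
        rw [PySem.List.pyRange_one]
        have : (tmaxB stop + 1 - max i (loB start)).toNat = 0 := by omega
        rw [this]
        simp
      rw [hempty]
      rfl

-- ===== VERDICT (by name: the statement is the Claim_ definition above) =====
theorem triangular_range_spec : Claim_equal_triangular_range := by
  intro start stop _
  unfold Spec_triangular_range triangular_range triangular_range_alt
  by_cases hstop : stop < 0
  · rw [triangular_range_loop, dif_neg (show ¬ ((0 : Int) + 0 ≤ stop) by omega), if_pos hstop]
    rfl
  · rw [if_neg hstop]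
    replace hstop : 0 ≤ stop := by omega
    rw [loop_eq start stop hstop ((tmaxB stop + 1).toNat) 0 0 (by omega) (by ring)
      (by omega) PySem.Dict.empty]
    have hmax : max (0 : Int) (loB start) = loB start := by
      have := lo_nonneg start
      omega
    rw [hmax]
    rfl
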